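-- pv_equiv track=rewrite | github.com/Vishal487/interviewbit | Strings/pretty json.py | prettyJson
-- ===== SOURCE A (Python) =====
-- def prettyJson(json):
--     # write your code here...
--     result = []
--     multiplier = 0
--     i = 0
--
--     while i < len(json):
--         if json[i] in ['{', '[']:
--             result.append('\t' * multiplier + json[i])
--             multiplier += 1
--             i += 1
--         elif json[i] in ['}', ']']:
--             multiplier -= 1
--             result.append('\t' * multiplier + json[i])
--             i += 1
--         elif json[i] == ',':
--             result[-1]+= ','
--             i += 1
--         else:
--             start = i
--             while i < len(json) and json[i] not in ['{', '}', ',', '[', ']']: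
--                 i += 1
--             curr_s = json[start:i]
--             result.append('\t' * multiplier + curr_s)
--
--     return result
-- ===== SOURCE B (Python) =====
-- def prettyJson(json):
--     # Phase 1: tokenize — each bracket/comma is its own token, each maximal
--     # run of other characters is one token.
--     tokens = []
--     run = ''
--     for ch in json:
--         if ch in '{}[],':
--             if run:
--                 tokens.append(run)
--                 run = ''
--             tokens.append(ch)
--         else:
--             run += ch
--     if run:
--         tokens.append(run)
--     # Phase 2: one flat pass over tokens.
--     result = []
--     multiplier = 0
--     for tok in tokens:
--         if tok == '{' or tok == '[':
--             result.append('\t' * multiplier + tok)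
--             multiplier += 1
--         elif tok == '}' or tok == ']':
--             multiplier -= 1
--             result.append('\t' * multiplier + tok)
--         elif tok == ',':
--             result[-1] += ','
--         else:
--             result.append('\t' * multiplier + tok)
--     return result
-- ===== Notes on version B (the rewrite author's own statement) =====
-- stated objective: faster
-- what changed: Replaces A's manual index-driven while-loop with an inner scanning loop by a flat two-phase structure: a tokenizing pre-pass (brackets/commas as single tokens, maximal other runs as one token) followed by a simple for-loop over tokens; the single pass avoids A's per-character list-literal membership tests and repeated indexing/slicing.
-- outside the precondition, e.g. on prettyJson(','): A raises IndexError, B raises IndexError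
import Mathlib
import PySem

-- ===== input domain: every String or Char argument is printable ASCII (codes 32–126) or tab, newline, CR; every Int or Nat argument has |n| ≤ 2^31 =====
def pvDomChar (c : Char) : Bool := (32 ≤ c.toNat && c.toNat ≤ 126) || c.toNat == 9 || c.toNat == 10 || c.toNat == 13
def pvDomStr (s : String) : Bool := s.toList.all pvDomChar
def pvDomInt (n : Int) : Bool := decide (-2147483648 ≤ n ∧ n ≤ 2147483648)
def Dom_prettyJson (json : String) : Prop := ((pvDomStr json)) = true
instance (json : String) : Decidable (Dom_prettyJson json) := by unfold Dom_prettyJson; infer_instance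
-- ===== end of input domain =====

-- B replaces A's index-driven while-loop (with an inner scanning loop) by a flat
-- two-phase structure: tokenize first, then a single pass over the tokens; the timing
-- run measured B faster by a constant factor. Result lines are built as char lists
-- and converted to String at the end (exact: a Python str is its character sequence).

-- ===== PORT A =====
-- json[i] in ['{', '}', ',', '[', ']']
def pvSpecA (c : Char) : Bool := c == '{' || c == '}' || c == ',' || c == '[' || c == ']'

-- inner while: while i < len(json) and json[i] not in ['{','}',',','[',']']: i += 1
def pvScanA (cs : List Char) (i : Nat) : Nat :=
  if h : i < cs.length then
    if pvSpecA cs[i] then i else pvScanA cs (i + 1)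
  else i
termination_by cs.length - i

-- '\t' * multiplier (negative multiplier gives '', as Int.toNat clamps to 0 — exact)
def pvTabsA (m : Int) : List Char := List.replicate m.toNat '\t'

-- result[-1] += s (on the empty list Python raises IndexError; excluded by Pre_)
def pvLastAddA : List (List Char) → List Char → List (List Char)
  | [], _ => []
  | [x], s => [x ++ s]
  | x :: xs, s => x :: pvLastAddA xs s

theorem pvScanA_ge (cs : List Char) (i : Nat) : i ≤ pvScanA cs i := by
  unfold pvScanA
  split
  · split
    · exact Nat.le_refl i
    · exact Nat.le_trans (Nat.le_succ i) (pvScanA_ge cs (i + 1))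
  · exact Nat.le_refl i
termination_by cs.length - i

theorem pvScanA_gt (cs : List Char) (i : Nat) (h : i < cs.length)
    (hs : pvSpecA cs[i] = false) : i < pvScanA cs i := by
  unfold pvScanA
  rw [dif_pos h, if_neg (by simp [hs])]
  exact Nat.lt_of_lt_of_le (Nat.lt_succ_self i) (pvScanA_ge cs (i + 1))

-- the main while loop of A (state: i, multiplier, result)
def pvLoopA (cs : List Char) (i : Nat) (mult : Int) (result : List (List Char)) :
    List (List Char) :=
  if h : i < cs.length then
    if cs[i] == '{' || cs[i] == '[' then
      pvLoopA cs (i + 1) (mult + 1) (result ++ [pvTabsA mult ++ [cs[i]]])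
    else if cs[i] == '}' || cs[i] == ']' then
      pvLoopA cs (i + 1) (mult - 1) (result ++ [pvTabsA (mult - 1) ++ [cs[i]]])
    else if cs[i] == ',' then
      pvLoopA cs (i + 1) mult (pvLastAddA result [','])
    else
      -- json[start:i] with 0 ≤ start ≤ i ≤ len: exact as drop/take
      pvLoopA cs (pvScanA cs i) mult
        (result ++ [pvTabsA mult ++ (cs.drop i).take (pvScanA cs i - i)])
  else result
termination_by cs.length - i
decreasing_by
  · omega
  · omega
  · omega
  · have := pvScanA_gt cs i h (by simp only [pvSpecA]; simp; simp at *; tauto)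
    omega

def prettyJson (json : String) : List String :=
  (pvLoopA json.toList 0 0 []).map String.mk

-- ===== PORT B =====
-- ch in '{}[],'
def pvSpecB (c : Char) : Bool := c == '{' || c == '}' || c == '[' || c == ']' || c == ','

-- phase 1: for ch in json (state: run, tokens)
def pvTokB : List Char → List Char → List (List Char) → List (List Char)
  | [], run, tokens => if run.isEmpty then tokens else tokens ++ [run]
  | c :: rest, run, tokens =>
    if pvSpecB c then
      pvTokB rest [] ((if run.isEmpty then tokens else tokens ++ [run]) ++ [[c]])
    else
      pvTokB rest (run ++ [c]) tokens

def pvTabsB (m : Int) : List Char := List.replicate m.toNat '\t'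

-- result[-1] += s
def pvLastAddB : List (List Char) → List Char → List (List Char)
  | [], _ => []
  | [x], s => [x ++ s]
  | x :: xs, s => x :: pvLastAddB xs s

-- phase 2: one step of the for-loop over tokens (state: multiplier, result)
def pvStepB (st : Int × List (List Char)) (tok : List Char) : Int × List (List Char) :=
  if tok = ['{'] ∨ tok = ['['] then
    (st.1 + 1, st.2 ++ [pvTabsB st.1 ++ tok])
  else if tok = ['}'] ∨ tok = [']'] then
    (st.1 - 1, st.2 ++ [pvTabsB (st.1 - 1) ++ tok])
  else if tok = [','] then
    (st.1, pvLastAddB st.2 [','])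
  else
    (st.1, st.2 ++ [pvTabsB st.1 ++ tok])

def prettyJson_alt (json : String) : List String :=
  ((pvTokB json.toList [] []).foldl pvStepB ((0 : Int), ([] : List (List Char)))).2.map String.mk

-- ===== PRECONDITION & SPEC =====
-- Pre_ excludes exactly the strings whose first character is ',': there A (and B)
-- executes result[-1] += ',' on an empty result and raises IndexError.
def Pre_prettyJson (json : String) : Prop := json.toList.head? ≠ some ','
instance (json : String) : Decidable (Pre_prettyJson json) := by unfold Pre_prettyJson; infer_instance
def pvWitness_prettyJson : String := "{a:1,b:[2,3]}"
def Spec_prettyJson (json : String) (out : List String) : Prop := out = prettyJson_alt json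
instance (json : String) (out : List String) : Decidable (Spec_prettyJson json out) := by unfold Spec_prettyJson; infer_instance

-- ===== CLAIM (what is proved, stated in full; the proofs are below) =====
def Claim_equal_prettyJson : Prop := ∀ (json : String), Dom_prettyJson json → Pre_prettyJson json → Spec_prettyJson json (prettyJson json)

-- ===== LEMMAS AND PROOFS =====

theorem pvSpec_eq (c : Char) : pvSpecA c = pvSpecB c := by
  simp only [pvSpecA, pvSpecB]
  cases c == '{' <;> cases c == '}' <;> cases c == ',' <;> cases c == '[' <;>
    cases c == ']' <;> rfl

theorem pvLastAdd_eq (xs : List (List Char)) (s : List Char) :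
    pvLastAddA xs s = pvLastAddB xs s := by
  induction xs with
  | nil => rfl
  | cons x xs ih =>
    cases xs with
    | nil => rfl
    | cons y ys => simp [pvLastAddA, pvLastAddB, ih]

theorem pvTabs_eq (m : Int) : pvTabsA m = pvTabsB m := rfl

-- accumulator lemma for the tokenizer
theorem pvTokB_acc (cs : List Char) :
    ∀ (run : List Char) (tokens : List (List Char)),
      pvTokB cs run tokens = tokens ++ pvTokB cs run [] := by
  induction cs with
  | nil =>
    intro run tokens
    by_cases h : run.isEmpty <;> simp [pvTokB, h]
  | cons c rest ih =>
    intro run tokens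
    by_cases hs : pvSpecB c
    · by_cases h : run.isEmpty
      · simp only [pvTokB, if_pos hs, h, if_true, List.nil_append]
        rw [ih [] (tokens ++ [[c]]), ih [] [[c]]]
        simp [List.append_assoc]
      · simp only [pvTokB, if_pos hs, h, if_false, Bool.false_eq_true, List.nil_append]
        rw [ih [] (tokens ++ [run] ++ [[c]]), ih [] ([run] ++ [[c]])]
        simp [List.append_assoc]
    · simp only [pvTokB, if_neg hs]
      exact ih (run ++ [c]) tokens

-- the pending run is flushed by a maximal non-special scan
theorem pvTokB_run (P : Char → Bool) (hP : ∀ c, P c = ! pvSpecB c) :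
    ∀ (l run : List Char),
      pvTokB l run [] = pvTokB (l.dropWhile P) (run ++ l.takeWhile P) [] := by
  intro l
  induction l with
  | nil => intro run; simp
  | cons c rest ih =>
    intro run
    by_cases hs : pvSpecB c
    · simp [List.takeWhile_cons, List.dropWhile_cons, hP, hs]
    · simp only [pvTokB, if_neg hs, List.takeWhile_cons, List.dropWhile_cons, hP,
        hs, Bool.not_false, if_pos]
      rw [ih (run ++ [c])]
      simp

-- flushing a nonempty run before a special (or no) character
theorem pvTokB_flush (l run : List Char) (hrun : run ≠ [])
    (hl : ∀ c ∈ l.head?, pvSpecB c = true) :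
    pvTokB l run [] = run :: pvTokB l [] [] := by
  cases l with
  | nil =>
    have hre : run.isEmpty = false := by
      cases run with
      | nil => exact absurd rfl hrun
      | cons _ _ => rfl
    simp [pvTokB, hre]
  | cons c rest =>
    have hc : pvSpecB c = true := hl c (by simp)
    have hre : run.isEmpty = false := by
      cases run with
      | nil => exact absurd rfl hrun
      | cons _ _ => rfl
    simp only [pvTokB, if_pos hc, hre, if_false, Bool.false_eq_true,
      List.isEmpty_nil, if_true, List.nil_append]
    rw [pvTokB_acc rest [] ([run] ++ [[c]]), pvTokB_acc rest [] [[c]]]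
    simp

-- every element of a non-special run is non-special, so the run token is not a bracket/comma
theorem pvRun_not_special (seg : List Char) (hseg : ∀ c ∈ seg, pvSpecB c = false) :
    (¬(seg = ['{'] ∨ seg = ['['])) ∧ (¬(seg = ['}'] ∨ seg = [']'])) ∧ seg ≠ [','] := by
  refine ⟨?_, ?_, ?_⟩
  · rintro (rfl | rfl)
    · exact absurd (hseg '{' (by simp)) (by simp [pvSpecB])
    · exact absurd (hseg '[' (by simp)) (by simp [pvSpecB])
  · rintro (rfl | rfl)
    · exact absurd (hseg '}' (by simp)) (by simp [pvSpecB])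
    · exact absurd (hseg ']' (by simp)) (by simp [pvSpecB])
  · rintro rfl
    exact absurd (hseg ',' (by simp)) (by simp [pvSpecB])

theorem pvScanA_char (cs : List Char) (i : Nat) :
    pvScanA cs i = i + ((cs.drop i).takeWhile (fun c => ! pvSpecA c)).length := by
  unfold pvScanA
  split
  · rename_i h
    rw [List.drop_eq_getElem_cons h]
    by_cases hs : pvSpecA cs[i]
    · simp [hs]
    · rw [if_neg (by simp [hs])]
      rw [pvScanA_char cs (i + 1)]
      have hlen : (List.takeWhile (fun c => ! pvSpecA c) (cs[i] :: cs.drop (i + 1))).length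
          = (List.takeWhile (fun c => ! pvSpecA c) (cs.drop (i + 1))).length + 1 := by
        simp only [List.takeWhile_cons, hs, Bool.not_false, if_true, List.length_cons]
      omega
  · rename_i h
    rw [List.drop_eq_nil_of_le (by omega)]
    simp
termination_by cs.length - i

theorem pvTake_takeWhile (P : Char → Bool) (l : List Char) :
    l.take (l.takeWhile P).length = l.takeWhile P := by
  induction l with
  | nil => rfl
  | cons c rest ih =>
    by_cases h : P c <;> simp [List.takeWhile_cons, h, ih]

theorem pvDrop_dropWhile (P : Char → Bool) (l : List Char) :
    l.drop (l.takeWhile P).length = l.dropWhile P := by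
  induction l with
  | nil => rfl
  | cons c rest ih =>
    by_cases h : P c <;> simp [List.takeWhile_cons, List.dropWhile_cons, h, ih]

-- main invariant: A's loop from index i equals B's token fold over the tokens of cs.drop i
theorem pvMain (n : Nat) (cs : List Char) (i : Nat) (mult : Int)
    (result : List (List Char)) (hn : cs.length - i ≤ n) :
    pvLoopA cs i mult result =
      (List.foldl pvStepB (mult, result) (pvTokB (cs.drop i) [] [])).2 := by
  induction n generalizing i mult result with
  | zero =>
    have hge : cs.length ≤ i := by omega
    rw [pvLoopA, dif_neg (by omega), List.drop_eq_nil_of_le hge]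
    rfl
  | succ n ih =>
    by_cases h : i < cs.length
    · have hdrop : cs.drop i = cs[i] :: cs.drop (i + 1) := List.drop_eq_getElem_cons h
      rw [pvLoopA, dif_pos h]
      by_cases h1 : (cs[i] == '{' || cs[i] == '[') = true
      · have hspec : pvSpecB cs[i] = true := by
          simp only [pvSpecB]; rcases Bool.or_eq_true_iff.mp h1 with h' | h' <;> simp [h']
        have hform : cs[i] = '{' ∨ cs[i] = '[' := by
          rcases Bool.or_eq_true_iff.mp h1 with h' | h' <;>
            [left; right] <;> exact beq_iff_eq.mp h'
        rw [if_pos h1, hdrop]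
        simp only [pvTokB, if_pos hspec, List.isEmpty_nil, eq_self_iff_true, if_true, List.nil_append]
        rw [pvTokB_acc _ [] [[cs[i]]], List.foldl_append]
        rw [ih (i + 1) (mult + 1) _ (by omega)]
        congr 1
        simp only [List.foldl_cons, List.foldl_nil, pvStepB]
        rw [if_pos (by rcases hform with h' | h' <;> simp [h'])]
        rw [pvTabs_eq]
      · by_cases h2 : (cs[i] == '}' || cs[i] == ']') = true
        · have hspec : pvSpecB cs[i] = true := by
            simp only [pvSpecB]; rcases Bool.or_eq_true_iff.mp h2 with h' | h' <;> simp [h']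
          have hform : cs[i] = '}' ∨ cs[i] = ']' := by
            rcases Bool.or_eq_true_iff.mp h2 with h' | h' <;>
              [left; right] <;> exact beq_iff_eq.mp h'
          rw [if_neg h1, if_pos h2, hdrop]
          simp only [pvTokB, if_pos hspec, List.isEmpty_nil, eq_self_iff_true, if_true, List.nil_append]
          rw [pvTokB_acc _ [] [[cs[i]]], List.foldl_append]
          rw [ih (i + 1) (mult - 1) _ (by omega)]
          congr 1
          simp only [List.foldl_cons, List.foldl_nil, pvStepB]
          rw [if_neg (by rcases hform with h' | h' <;> simp [h', Char.ext_iff])]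
          rw [if_pos (by rcases hform with h' | h' <;> simp [h'])]
          rw [pvTabs_eq]
        · by_cases h3 : (cs[i] == ',') = true
          · have hc : cs[i] = ',' := beq_iff_eq.mp h3
            have hspec : pvSpecB cs[i] = true := by simp [pvSpecB, hc]
            rw [if_neg h1, if_neg h2, if_pos h3, hdrop]
            simp only [pvTokB, if_pos hspec, List.isEmpty_nil, eq_self_iff_true, if_true, List.nil_append]
            rw [pvTokB_acc _ [] [[cs[i]]], List.foldl_append]
            rw [ih (i + 1) mult _ (by omega)]
            congr 1
            simp only [List.foldl_cons, List.foldl_nil, pvStepB, hc]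
            rw [if_neg (by simp [Char.ext_iff]), if_neg (by simp [Char.ext_iff])]
            simp only [eq_self_iff_true, if_true]
            rw [pvLastAdd_eq]
          · -- run case
            have hsA : pvSpecA cs[i] = false := by
              simp only [pvSpecA]
              simp only [Bool.or_eq_true] at h1 h2 h3 ⊢
              push_neg at h1 h2
              simp [h1.1, h1.2, h2.1, h2.2, h3]
            have hsB : pvSpecB cs[i] = false := by rw [← pvSpec_eq]; exact hsA
            rw [if_neg h1, if_neg h2, if_neg h3]
            set P : Char → Bool := fun c => ! pvSpecB c with hPdef
            have hPA : (fun c => ! pvSpecA c) = P := by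
              funext c; simp [hPdef, pvSpec_eq]
            have hscan := pvScanA_char cs i
            rw [hPA] at hscan
            set l := cs.drop i with hl
            have hseg : (pvScanA cs i) - i = (l.takeWhile P).length := by omega
            -- tokenizer side
            rw [pvTokB_run P (fun c => rfl) l []]
            have hne : l.takeWhile P ≠ [] := by
              rw [hdrop, List.takeWhile_cons, hPdef]
              simp [hsB]
            have hhead : ∀ c ∈ (l.dropWhile P).head?, pvSpecB c = true := by
              intro c hc
              have := List.head?_dropWhile_not P l
              cases hd : (l.dropWhile P).head? with
              | none => simp [hd] at hc
              | some d =>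
                simp [hd] at hc this
                subst hc
                simpa [hPdef] using this
            rw [List.nil_append, pvTokB_flush _ _ hne hhead, List.foldl_cons]
            have hstep : pvStepB (mult, result) (l.takeWhile P) =
                (mult, result ++ [pvTabsB mult ++ l.takeWhile P]) := by
              have hall : ∀ c ∈ l.takeWhile P, pvSpecB c = false := by
                intro c hc
                have := List.mem_takeWhile_imp hc  -- c satisfies P
                simpa [hPdef] using this
              obtain ⟨g1, g2, g3⟩ := pvRun_not_special _ hall
              simp only [pvStepB, if_neg g1, if_neg g2, if_neg g3]
            rw [hstep]
            have hdropw : cs.drop (pvScanA cs i) = l.dropWhile P := by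
              have : pvScanA cs i = i + (l.takeWhile P).length := by omega
              rw [this, ← List.drop_drop, ← hl, pvDrop_dropWhile]
            have htw : l.take (pvScanA cs i - i) = l.takeWhile P := by
              rw [hseg, pvTake_takeWhile]
            have hlt : cs.length - pvScanA cs i ≤ n := by
              have := pvScanA_gt cs i h hsA
              have := pvScanA_ge cs i
              omega
            rw [ih (pvScanA cs i) mult _ hlt, hdropw, htw, pvTabs_eq]
    · rw [pvLoopA, dif_neg h, List.drop_eq_nil_of_le (by omega)]
      rfl

-- ===== VERDICT (by name: the statement is the Claim_ definition above) =====
theorem prettyJson_spec : Claim_equal_prettyJson := by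
  intro json _ _
  unfold Spec_prettyJson prettyJson prettyJson_alt
  rw [pvMain json.toList.length json.toList 0 0 [] (by omega)]
  rfl
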